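-- pv_equiv track=rewrite | github.com/spoonfloor/baby-eats | scripts/prune_dead_list_css.py | _find_selector_end
-- ===== SOURCE A (Python) =====
-- def _skip_string(s: str, i: int) -> int:
--     q = s[i]
--     i += 1
--     n = len(s)
--     while i < n:
--         c = s[i]
--         if c == "\\" and i + 1 < n:
--             i += 2
--             continue
--         if c == q:
--             return i + 1
--         i += 1
--     return n
--
-- def _skip_comment(s: str, i: int) -> int:
--     if s[i : i + 2] != "/*":
--         return i
--     j = s.find("*/", i + 2)
--     return j + 2 if j != -1 else len(s)
--
-- def _find_selector_end(s: str, start: int) -> int: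
--     """Index of '{' that opens declarations for a qualified rule."""
--     i = start
--     n = len(s)
--     while i < n:
--         if s[i : i + 2] == "/*":
--             i = _skip_comment(s, i)
--             continue
--         c = s[i]
--         if c in "\"'":
--             i = _skip_string(s, i)
--             continue
--         if c == "{":
--             return i
--         i += 1
--     return n
-- ===== SOURCE B (Python) =====
-- def _string_end(s: str, i: int) -> int:
--     """Position just past the string literal opened by the quote at s[i].
--
--     Instead of walking character by character, repeatedly jump to the next
--     occurrence of the quote with str.find and accept it iff the maximal run
--     of backslashes immediately before it has even length (even = the quote
--     itself is not escaped)."""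
--     q = s[i]
--     n = len(s)
--     p = i + 1
--     while True:
--         j = s.find(q, p)
--         if j == -1:
--             return n
--         k = j
--         while k > 0 and s[k - 1] == "\\":
--             k -= 1
--         if (j - k) % 2 == 0:
--             return j + 1
--         p = j + 1
--
--
-- def _find_selector_end(s: str, start: int) -> int:
--     """Index of '{' that opens declarations for a qualified rule."""
--     n = len(s)
--     i = start
--     while True:
--         cands = [j for j in (s.find("{", i), s.find('"', i), s.find("'", i), s.find("/*", i)) if j != -1]
--         if not cands:
--             return n
--         j = min(cands)
--         c = s[j]
--         if c == "{":
--             return j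
--         if c == "/":
--             e = s.find("*/", j + 2)
--             if e == -1:
--                 return n
--             i = e + 2
--         else:
--             i = _string_end(s, j)
-- ===== Notes on version B (the rewrite author's own statement) =====
-- stated objective: faster
-- what changed: Replaced A's character-by-character scan (with per-char skip helpers) by a jump-based search: repeatedly str.find the next occurrence of '{', each quote and '/*', jump to the minimum, and close strings by finding the next quote and accepting it iff the maximal backslash run before it has even length; the C-level str.find jumps replace the per-character Python loop.
-- outside the precondition, e.g. on _find_selector_end('"a"{', -4): A returns -1, B returns 3; on _find_selector_end('a', -5): A raises IndexError, B returns 1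
import Mathlib
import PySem

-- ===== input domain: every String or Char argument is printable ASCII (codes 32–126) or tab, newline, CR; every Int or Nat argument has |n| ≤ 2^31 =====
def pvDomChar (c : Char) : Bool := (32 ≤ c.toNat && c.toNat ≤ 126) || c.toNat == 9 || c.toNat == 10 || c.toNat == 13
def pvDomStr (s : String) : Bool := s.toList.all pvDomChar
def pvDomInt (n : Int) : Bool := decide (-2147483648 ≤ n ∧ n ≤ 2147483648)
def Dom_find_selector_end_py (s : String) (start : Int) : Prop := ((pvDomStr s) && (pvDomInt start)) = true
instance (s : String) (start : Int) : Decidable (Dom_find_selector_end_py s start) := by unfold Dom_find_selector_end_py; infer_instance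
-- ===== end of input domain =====

-- B replaces A's character-by-character scan by jump-based searching: str.find jumps to the next
-- '{', quote or '/*', and string ends are accepted by backslash-run parity (faster: C-level find
-- jumps instead of a per-character Python loop; measured faster in a timing run).


-- ===== PORT A =====
-- _skip_string's while loop; fuel ≥ len(s) - i keeps it exact (one unit per iteration)
def skipStringA (cs : List Char) (q : Char) : Nat → Int → Int
  | 0, _ => (cs.length : Int)
  | f+1, i =>
    if i < (cs.length : Int) then
      match PySem.List.pyGet? cs i with
      | none => 0  -- Python raises IndexError here (outside Pre_)
      | some c =>
        if c = '\\' ∧ i + 1 < (cs.length : Int) then skipStringA cs q f (i+2)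
        else if c = q then i + 1
        else skipStringA cs q f (i+1)
    else (cs.length : Int)

-- _skip_string: q = s[i], then the loop from i+1
def skipStringEntryA (cs : List Char) (i : Int) : Int :=
  match PySem.List.pyGet? cs i with
  | none => 0  -- Python raises IndexError here (outside Pre_)
  | some q => skipStringA cs q (cs.length + 1) (i+1)

-- _skip_comment
def skipCommentA (cs : List Char) (i : Int) : Int :=
  if PySem.List.slice cs (some i) (some (i+2)) ≠ ['/', '*'] then i
  else
    let j := PySem.Chars.findFrom cs ['*', '/'] (i+2) none
    if j ≠ -1 then j + 2 else (cs.length : Int)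

-- _find_selector_end's while loop; fuel ≥ len(s) - start keeps it exact
def loopA (cs : List Char) : Nat → Int → Int
  | 0, _ => (cs.length : Int)
  | f+1, i =>
    if i < (cs.length : Int) then
      if PySem.List.slice cs (some i) (some (i+2)) = ['/', '*'] then loopA cs f (skipCommentA cs i)
      else
        match PySem.List.pyGet? cs i with
        | none => 0  -- Python raises IndexError here (outside Pre_)
        | some c =>
          if c = '"' ∨ c = '\'' then loopA cs f (skipStringEntryA cs i)
          else if c = '{' then i
          else loopA cs f (i+1)
    else (cs.length : Int)

def find_selector_end_py (s : String) (start : Int) : Int :=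
  loopA s.toList (s.toList.length + 1) start

-- ===== PORT B =====
-- inner while of _string_end: k walks left over the backslash run before the found quote
def runStartB (cs : List Char) : Nat → Int → Int
  | 0, k => k
  | f+1, k =>
    if 0 < k then
      match PySem.List.pyGet? cs (k-1) with
      | none => 0  -- Python raises IndexError here (unreachable: k-1 is always in range in B's calls)
      | some c => if c = '\\' then runStartB cs f (k-1) else k
    else k

-- _string_end's outer while True loop; one fuel unit per find-jump (p strictly increases)
def stringEndB (cs : List Char) (q : Char) : Nat → Int → Int
  | 0, _ => (cs.length : Int)
  | f+1, p =>
    let j := PySem.Chars.findFrom cs [q] p none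
    if j = -1 then (cs.length : Int)
    else
      let k := runStartB cs (cs.length + 1) j
      if PySem.Int.mod (j - k) 2 = 0 then j + 1
      else stringEndB cs q f (j+1)

-- _find_selector_end's while True loop; one fuel unit per jump (i strictly increases)
def loopBj (cs : List Char) : Nat → Int → Int
  | 0, _ => (cs.length : Int)
  | f+1, i =>
    let cands := ([PySem.Chars.findFrom cs ['{'] i none,
                   PySem.Chars.findFrom cs ['"'] i none,
                   PySem.Chars.findFrom cs ['\''] i none,
                   PySem.Chars.findFrom cs ['/', '*'] i none]).filter (fun j => j ≠ -1)
    match PySem.List.min? cands (fun x => x) with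
    | none => (cs.length : Int)
    | some j =>
      match PySem.List.pyGet? cs j with
      | none => 0  -- Python raises IndexError here (unreachable: j is a find result, in range)
      | some c =>
        if c = '{' then j
        else if c = '/' then
          let e := PySem.Chars.findFrom cs ['*', '/'] (j+2) none
          if e = -1 then (cs.length : Int) else loopBj cs f (e+2)
        else loopBj cs f (stringEndB cs c (cs.length + 1) (j+1))

def find_selector_end_py_alt (s : String) (start : Int) : Int :=
  loopBj s.toList (s.toList.length + 1) start

-- ===== PRECONDITION & SPEC =====
-- Pre_ excludes negative start: for start < -len(s) A raises IndexError, and for -len(s) ≤ start < 0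
-- Python's negative-index wraparound in A (vs str.find's clamping in B) makes both results accidental
-- artefacts, so neither value is the specified one.
def Pre_find_selector_end_py (s : String) (start : Int) : Prop := 0 ≤ start
instance (s : String) (start : Int) : Decidable (Pre_find_selector_end_py s start) := by unfold Pre_find_selector_end_py; infer_instance
def pvWitness_find_selector_end_py : String × Int := ("a{/*b*/", 0)
def Spec_find_selector_end_py (s : String) (start : Int) (out : Int) : Prop := out = find_selector_end_py_alt s start
instance (s : String) (start : Int) (out : Int) : Decidable (Spec_find_selector_end_py s start out) := by unfold Spec_find_selector_end_py; infer_instance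

-- ===== CLAIM (what is proved, stated in full; the proofs are below) =====
def Claim_equal_find_selector_end_py : Prop := ∀ (s : String) (start : Int), Dom_find_selector_end_py s start → Pre_find_selector_end_py s start → Spec_find_selector_end_py s start (find_selector_end_py s start)

-- ===== LEMMAS AND PROOFS =====

theorem prefix_singleton_iff (l : List Char) (m : Nat) (a : Char) :
    [a] <+: l.drop m ↔ l[m]? = some a := by
  constructor
  · rintro ⟨t, ht⟩
    have h0 : (l.drop m)[0]? = some a := by rw [← ht]; rfl
    simpa [List.getElem?_drop] using h0
  · intro h
    have h0 : (l.drop m)[0]? = some a := by simpa [List.getElem?_drop] using h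
    cases hd : l.drop m with
    | nil => rw [hd] at h0; simp at h0
    | cons x t =>
      rw [hd] at h0
      simp at h0
      exact ⟨t, by simp [h0]⟩

theorem infix_singleton_iff (l : List Char) (a : Char) : [a] <:+: l ↔ a ∈ l := by
  constructor
  · rintro ⟨s, t, rfl⟩; simp
  · intro h
    obtain ⟨s, t, rfl⟩ := List.append_of_mem h
    exact ⟨s, t, by simp⟩

theorem prefix_head_char (l sub : List Char) (a : Char) (m : Nat) (hp : (a :: sub) <+: l.drop m) :
    l[m]? = some a := by
  obtain ⟨t, ht⟩ := hp
  have h0 : (l.drop m)[0]? = some a := by rw [← ht]; rfl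
  simpa [List.getElem?_drop] using h0

theorem infix_drop_mono (l : List Char) (m j : Nat) (h : m ≤ j) :
    l.drop j <:+: l.drop m := by
  have hd : l.drop j = (l.drop m).drop (j - m) := by
    rw [List.drop_drop]; congr 1; omega
  rw [hd]
  exact (List.drop_suffix _ _).isInfix

theorem prefix_drop_infix (l sub : List Char) (m j : Nat) (h : m ≤ j) (hp : sub <+: l.drop j) :
    sub <:+: l.drop m :=
  hp.isInfix.trans (infix_drop_mono l m j h)

theorem slice2_eq (cs : List Char) (m : Nat) :
    PySem.List.slice cs (some (m : Int)) (some ((m : Int) + 2)) = (cs.drop m).take 2 := by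
  rw [show ((m : Int) + 2) = ((m + 2 : Nat) : Int) by push_cast; ring]
  rw [PySem.List.slice_natCast]
  congr 1
  omega

theorem slice2_eq_iff_prefix (cs sub : List Char) (m : Nat) (hlen : sub.length = 2) :
    PySem.List.slice cs (some (m : Int)) (some ((m : Int) + 2)) = sub ↔ sub <+: cs.drop m := by
  rw [slice2_eq, List.prefix_iff_eq_take, hlen, eq_comm]

theorem slice2_len (cs : List Char) (m : Nat) (a b : Char)
    (h : PySem.List.slice cs (some (m : Int)) (some ((m : Int) + 2)) = [a, b]) :
    m + 2 ≤ cs.length := by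
  rw [slice2_eq] at h
  have := congrArg List.length h
  simp [List.length_take, List.length_drop] at this
  omega

theorem findFrom_gt_len (cs sub : List Char) (st : Int) (h : (cs.length : Int) < st) :
    PySem.Chars.findFrom cs sub st none = -1 := by
  have h0 : ¬ st < 0 := by omega
  simp only [PySem.Chars.findFrom, if_neg h0]
  rw [if_pos h]

theorem pymod2 (a : Int) : PySem.Int.mod a 2 = a % 2 := by
  simp [PySem.Int.mod, Int.fmod_eq_emod]

theorem skipStringA_fuel_succ (cs : List Char) (q : Char) (f : Nat) (i : Int)
    (h : (cs.length : Int) ≤ i + f) : skipStringA cs q f i = skipStringA cs q (f + 1) i := by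
  induction f generalizing i with
  | zero =>
    simp only [skipStringA]
    rw [if_neg (by push_cast at h ⊢; omega)]
  | succ f ih =>
    conv_lhs => rw [skipStringA]
    conv_rhs => rw [skipStringA]
    by_cases hi : i < (cs.length : Int)
    · simp only [if_pos hi]
      cases hc : PySem.List.pyGet? cs i with
      | none => rfl
      | some c =>
        by_cases hb : c = '\\' ∧ i + 1 < (cs.length : Int)
        · simp only [if_pos hb]
          exact ih (i + 2) (by push_cast at h ⊢; omega)
        · simp only [if_neg hb]
          by_cases hq : c = q
          · simp only [if_pos hq]
          · simp only [if_neg hq]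
            exact ih (i + 1) (by push_cast at h ⊢; omega)
    · simp only [if_neg hi]

theorem skipStringA_lb (cs : List Char) (q : Char) (f : Nat) (i : Int) (hi : 0 ≤ i) :
    i ≤ skipStringA cs q f i ∨ skipStringA cs q f i = (cs.length : Int) := by
  induction f generalizing i with
  | zero => right; rfl
  | succ f ih =>
    by_cases hlt : i < (cs.length : Int)
    · obtain ⟨c, hc⟩ : ∃ c, PySem.List.pyGet? cs i = some c :=
        ⟨_, PySem.List.pyGet?_eq_some_getElem cs hi hlt⟩
      simp only [skipStringA, if_pos hlt, hc]
      by_cases hb : c = '\\' ∧ i + 1 < (cs.length : Int)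
      · simp only [if_pos hb]
        rcases ih (i + 2) (by omega) with h | h
        · left; omega
        · right; exact h
      · simp only [if_neg hb]
        by_cases hq : c = q
        · simp only [if_pos hq]; left; omega
        · simp only [if_neg hq]
          rcases ih (i + 1) (by omega) with h | h
          · left; omega
          · right; exact h
    · right
      simp only [skipStringA, if_neg hlt]

theorem loopA_at_len (cs : List Char) (f : Nat) : loopA cs f (cs.length : Int) = (cs.length : Int) := by
  cases f with
  | zero => rfl
  | succ f => simp only [loopA]; rw [if_neg (lt_irrefl _)]

theorem skipCommentA_bounds (cs : List Char) (m : Nat)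
    (hs : PySem.List.slice cs (some (m : Int)) (some ((m : Int) + 2)) = ['/', '*']) :
    ((m : Int) + 1 ≤ skipCommentA cs (m : Int) ∨ skipCommentA cs (m : Int) = (cs.length : Int)) := by
  have hm2 : m + 2 ≤ cs.length := slice2_len cs m '/' '*' hs
  unfold skipCommentA
  rw [if_neg (by simp [hs])]
  by_cases he : PySem.Chars.findFrom cs ['*', '/'] ((m : Int) + 2) none = -1
  · simp only [he]
    simp
  · simp only [he, if_pos]
    left
    have hc : ((m : Int) + 2) = ((m + 2 : Nat) : Int) := by push_cast; ring
    rw [hc] at he ⊢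
    obtain ⟨hle, _, _⟩ := PySem.Chars.findFrom_natCast_spec cs _ (m + 2) hm2 he
    simp only [ne_eq, he, not_false_eq_true, if_true]
    push_cast at hle ⊢
    omega

theorem loopA_fuel_succ (cs : List Char) (f : Nat) (i : Int)
    (h0 : 0 ≤ i) (h : (cs.length : Int) ≤ i + f) : loopA cs f i = loopA cs (f + 1) i := by
  induction f generalizing i with
  | zero =>
    simp only [loopA]
    rw [if_neg (by push_cast at h ⊢; omega)]
  | succ f ih =>
    conv_lhs => rw [loopA]
    conv_rhs => rw [loopA]
    by_cases hi : i < (cs.length : Int)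
    · simp only [if_pos hi]
      by_cases hsl : PySem.List.slice cs (some i) (some (i + 2)) = ['/', '*']
      · simp only [if_pos hsl]
        obtain ⟨m, rfl⟩ : ∃ m : Nat, i = (m : Int) := ⟨i.toNat, (Int.toNat_of_nonneg h0).symm⟩
        rcases skipCommentA_bounds cs m hsl with hb | hb
        · refine ih (skipCommentA cs (m : Int)) (by omega) (by push_cast at h ⊢; omega)
        · rw [hb]
          refine ih _ (by positivity) (by push_cast; omega)
      · simp only [if_neg hsl]
        cases hc : PySem.List.pyGet? cs i with
        | none => rfl
        | some c =>
          by_cases hqc : c = '"' ∨ c = '\''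
          · simp only [if_pos hqc]
            have hentry : skipStringEntryA cs i = skipStringA cs c (cs.length + 1) (i + 1) := by
              unfold skipStringEntryA
              rw [hc]
            rcases skipStringA_lb cs c (cs.length + 1) (i + 1) (by omega) with hb | hb
            · refine ih _ (by omega) ?_
              rw [hentry]
              push_cast at h ⊢
              omega
            · refine ih _ ?_ ?_ <;> rw [hentry, hb]
              · positivity
              · push_cast; omega
          · simp only [if_neg hqc]
            by_cases hbr : c = '{'
            · simp only [if_pos hbr]
            · simp only [if_neg hbr]
              exact ih (i + 1) (by omega) (by push_cast at h ⊢; omega)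
    · simp only [if_neg hi]

theorem loopA_boring (cs : List Char) (j : Nat) (hj : j ≤ cs.length) :
    ∀ (d i : Nat), j - i = d → i ≤ j →
    (∀ m : Nat, i ≤ m → m < j → cs[m]? ≠ some '{' ∧ cs[m]? ≠ some '"' ∧
        cs[m]? ≠ some '\'' ∧ ¬ (['/', '*'] <+: cs.drop m)) →
    loopA cs (cs.length + 1) (i : Int) = loopA cs (cs.length + 1) (j : Int) := by
  intro d
  induction d with
  | zero =>
    intro i hd hij _
    have : i = j := by omega
    rw [this]
  | succ d ih =>
    intro i hd hij hbor
    have hi : i < j := by omega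
    have hilen : i < cs.length := lt_of_lt_of_le hi hj
    obtain ⟨h1, h2, h3, h4⟩ := hbor i le_rfl hi
    have hgi : cs[i]? = some cs[i] := List.getElem?_eq_getElem hilen
    have hstep : loopA cs (cs.length + 1) (i : Int) = loopA cs (cs.length + 1) ((i : Int) + 1) := by
      conv_lhs => rw [loopA]
      rw [if_pos (by push_cast; omega)]
      rw [if_neg (fun hc => h4 ((slice2_eq_iff_prefix cs _ i rfl).mp hc))]
      simp only [show PySem.List.pyGet? cs (i : Int) = some cs[i] by
        rw [PySem.List.pyGet?_natCast]; exact hgi]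
      rw [if_neg (by rintro (h | h) <;> rw [h] at hgi
                     exacts [h2 hgi, h3 hgi])]
      rw [if_neg (by intro h; rw [h] at hgi; exact h1 hgi)]
      exact loopA_fuel_succ cs cs.length ((i:Int)+1) (by omega) (by push_cast; omega)
    rw [hstep, show ((i : Int) + 1) = ((i + 1 : Nat) : Int) by push_cast; ring]
    exact ih (i + 1) (by omega) (by omega) (fun m hm hmj => hbor m (by omega) hmj)

theorem skipStringA_noq (cs : List Char) (q : Char) :
    ∀ (f : Nat) (i : Int), 0 ≤ i → q ∉ cs.drop i.toNat →
    skipStringA cs q f i = (cs.length : Int) := by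
  intro f
  induction f with
  | zero => intro i _ _; rfl
  | succ f ih =>
    intro i h0 hnq
    by_cases hlt : i < (cs.length : Int)
    · have hglt : i.toNat < cs.length := by omega
      have hg : PySem.List.pyGet? cs i = some cs[i.toNat] :=
        PySem.List.pyGet?_eq_some_getElem cs h0 hlt
      have hmem : cs[i.toNat] ∈ cs.drop i.toNat := by
        have hl0 : 0 < (cs.drop i.toNat).length := by
          rw [List.length_drop]; omega
        have he : (cs.drop i.toNat)[0]'hl0 = cs[i.toNat + 0]'(by omega) :=
          List.getElem_drop
        rw [show cs[i.toNat] = cs[i.toNat + 0]'(by omega) by congr 1, ← he]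
        exact List.getElem_mem _
      have hcq : cs[i.toNat] ≠ q := fun h => hnq (h ▸ hmem)
      have hsub : ∀ k : Nat, cs.drop (i.toNat + k) ⊆ cs.drop i.toNat := by
        intro k
        rw [← List.drop_drop]
        exact List.drop_subset _ _
      simp only [skipStringA, if_pos hlt, hg]
      by_cases hb : cs[i.toNat] = '\\' ∧ i + 1 < (cs.length : Int)
      · simp only [if_pos hb]
        refine ih (i + 2) (by omega) (fun hm => hnq ?_)
        have : (i + 2).toNat = i.toNat + 2 := by omega
        rw [this] at hm
        exact hsub 2 hm
      · simp only [if_neg hb, if_neg hcq]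
        refine ih (i + 1) (by omega) (fun hm => hnq ?_)
        have : (i + 1).toNat = i.toNat + 1 := by omega
        rw [this] at hm
        exact hsub 1 hm
    · simp only [skipStringA, if_neg hlt]

theorem runStartB_spec (cs : List Char) (b : Int) (hb1 : 1 ≤ b)
    (hbstop : PySem.List.pyGet? cs (b - 1) ≠ some '\\') :
    ∀ (f : Nat) (k : Int), b ≤ k → k < (cs.length : Int) → (k - b).toNat < f →
    b ≤ runStartB cs f k ∧ runStartB cs f k ≤ k ∧
    (∀ m : Int, runStartB cs f k ≤ m → m < k → PySem.List.pyGet? cs m = some '\\') ∧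
    PySem.List.pyGet? cs (runStartB cs f k - 1) ≠ some '\\' := by
  intro f
  induction f with
  | zero => intro k hbk _ hfuel; omega
  | succ f ih =>
    intro k hbk hkn hfuel
    have hk0 : 0 < k := by omega
    have hg : PySem.List.pyGet? cs (k - 1) = some cs[(k-1).toNat] :=
      PySem.List.pyGet?_eq_some_getElem cs (by omega) (by omega)
    simp only [runStartB, if_pos hk0, hg]
    by_cases hc : cs[(k-1).toNat] = '\\'
    · simp only [if_pos hc]
      have hne : k ≠ b := by
        rintro rfl
        exact hbstop (hc ▸ hg)
      have hrec := ih (k - 1) (by omega) (by omega) (by omega)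
      refine ⟨by omega, by omega, ?_, hrec.2.2.2⟩
      intro m hm1 hm2
      rcases lt_or_ge m (k - 1) with h | h
      · exact hrec.2.2.1 m hm1 h
      · have : m = k - 1 := by omega
        rw [this]
        rw [hg, hc]
    · simp only [if_neg hc]
      refine ⟨hbk, le_refl k, fun m hm1 hm2 => absurd hm2 (by omega), ?_⟩
      rw [hg]
      intro h
      exact hc (Option.some.injEq _ _ ▸ h)

theorem run_scan (cs : List Char) (q : Char) (hq : q ≠ '\\') (J : Nat) (hJ : J < cs.length)
    (hqJ : cs[J]? = some q) (K : Int)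
    (hrun : ∀ m : Int, K ≤ m → m < (J : Int) → PySem.List.pyGet? cs m = some '\\') :
    ∀ (d : Nat) (m : Int), ((J : Int) - m).toNat = d → K ≤ m → m ≤ (J : Int) → 0 ≤ m →
    skipStringA cs q (cs.length + 1) m =
      (if ((J : Int) - m) % 2 = 0 then (J : Int) + 1
       else skipStringA cs q (cs.length + 1) ((J : Int) + 1)) := by
  intro d
  induction d using Nat.strong_induction_on with
  | _ d ih =>
  intro m hd hKm hmJ hm0
  rcases lt_or_eq_of_le hmJ with hmlt | hmeq
  case inr =>
    rw [hmeq]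
    have hg : PySem.List.pyGet? cs ((J : Int)) = some q := by
      rw [PySem.List.pyGet?_natCast, hqJ]
    conv_lhs => rw [skipStringA]
    rw [if_pos (by push_cast; omega)]
    simp only [hg]
    rw [if_neg (by rintro ⟨h, -⟩; exact hq h)]
    rw [if_pos (by trivial), if_pos (by omega)]
  case inl =>
    have hg : PySem.List.pyGet? cs m = some '\\' := hrun m hKm hmlt
    conv_lhs => rw [skipStringA]
    rw [if_pos (by push_cast; omega)]
    simp only [hg]
    rw [if_pos (by refine ⟨by trivial, by push_cast; omega⟩)]
    have hfs : skipStringA cs q cs.length (m + 2) = skipStringA cs q (cs.length + 1) (m + 2) :=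
      skipStringA_fuel_succ cs q cs.length (m + 2) (by push_cast; omega)
    rw [hfs]
    rcases lt_or_ge ((J : Int)) (m + 2) with h2 | h2
    · have : m + 2 = (J : Int) + 1 := by omega
      rw [this]
      rw [if_neg (by omega)]
    · have := ih (((J : Int) - (m + 2)).toNat) (by omega) (m + 2) rfl (by omega) h2 (by omega)
      rw [this]
      have hpar : (((J : Int) - m) % 2 = 0) ↔ (((J : Int) - (m + 2)) % 2 = 0) := by omega
      by_cases hp : ((J : Int) - (m + 2)) % 2 = 0
      · rw [if_pos hp, if_pos (hpar.mpr hp)]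
      · rw [if_neg hp, if_neg (fun h => hp (hpar.mp h))]

theorem skipStringA_to_runStart (cs : List Char) (q : Char) (K p0 : Int)
    (hKn : K ≤ (cs.length : Int))
    (hKstop : PySem.List.pyGet? cs (K - 1) ≠ some '\\')
    (noq : ∀ m : Int, p0 ≤ m → m < K → PySem.List.pyGet? cs m ≠ some q) :
    ∀ (d : Nat) (m : Int), (K - m).toNat = d → m ≤ K → 0 ≤ m → p0 ≤ m →
    skipStringA cs q (cs.length + 1) m = skipStringA cs q (cs.length + 1) K := by
  intro d
  induction d using Nat.strong_induction_on with
  | _ d ih =>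
  intro m hd hmK hm0 hp0m
  rcases lt_or_eq_of_le hmK with hmlt | hmeq
  case inr => rw [hmeq]
  case inl =>
    have hg : PySem.List.pyGet? cs m = some cs[m.toNat] :=
      PySem.List.pyGet?_eq_some_getElem cs hm0 (by omega)
    have hcq : cs[m.toNat] ≠ q := fun h => noq m hp0m hmlt (h ▸ hg)
    conv_lhs => rw [skipStringA]
    rw [if_pos (by omega)]
    simp only [hg]
    by_cases hb : cs[m.toNat] = '\\' ∧ m + 1 < (cs.length : Int)
    · have hm1 : m ≠ K - 1 := by
        rintro rfl
        have : (K - 1 : Int).toNat = (K-1).toNat := rfl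
        exact hKstop (hb.1 ▸ hg)
      rw [if_pos hb]
      have hfs : skipStringA cs q cs.length (m + 2) = skipStringA cs q (cs.length + 1) (m + 2) :=
        skipStringA_fuel_succ cs q cs.length (m + 2) (by push_cast; omega)
      rw [hfs]
      exact ih ((K - (m + 2)).toNat) (by omega) (m + 2) rfl (by omega) (by omega) (by omega)
    · rw [if_neg hb, if_neg hcq]
      have hfs : skipStringA cs q cs.length (m + 1) = skipStringA cs q (cs.length + 1) (m + 1) :=
        skipStringA_fuel_succ cs q cs.length (m + 1) (by push_cast; omega)
      rw [hfs]
      exact ih ((K - (m + 1)).toNat) (by omega) (m + 1) rfl (by omega) (by omega) (by omega)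

theorem stringEndB_lb (cs : List Char) (q : Char) :
    ∀ (f : Nat) (p : Int), 0 ≤ p →
    (p + 1 ≤ stringEndB cs q f p ∨ stringEndB cs q f p = (cs.length : Int)) := by
  intro f
  induction f with
  | zero => intro p _; right; rfl
  | succ f ih =>
    intro p hp0
    simp only [stringEndB]
    by_cases hj : PySem.Chars.findFrom cs [q] p none = -1
    · rw [if_pos hj]; right; rfl
    · rw [if_neg hj]
      have hpj : p ≤ PySem.Chars.findFrom cs [q] p none := by
        rcases le_or_gt p (cs.length : Int) with hpn | hpn
        · obtain ⟨P, rfl⟩ : ∃ P : Nat, p = (P : Int) := ⟨p.toNat, (Int.toNat_of_nonneg hp0).symm⟩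
          exact (PySem.Chars.findFrom_natCast_spec cs [q] P (by exact_mod_cast hpn) hj).1
        · exact absurd (findFrom_gt_len cs [q] p hpn) hj
      by_cases hpar : PySem.Int.mod (PySem.Chars.findFrom cs [q] p none - runStartB cs (cs.length + 1) (PySem.Chars.findFrom cs [q] p none)) 2 = 0
      · rw [if_pos hpar]; left; omega
      · rw [if_neg hpar]
        rcases ih (PySem.Chars.findFrom cs [q] p none + 1) (by omega) with h | h
        · left; omega
        · right; exact h

theorem skipStringA_eq_stringEndB (cs : List Char) (q : Char) (hq : q ≠ '\\') :
    ∀ (f : Nat) (p : Int), 1 ≤ p → p ≤ (cs.length : Int) →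
    PySem.List.pyGet? cs (p - 1) ≠ some '\\' → (cs.length : Int) ≤ p + f →
    skipStringA cs q (cs.length + 1) p = stringEndB cs q f p := by
  intro f
  induction f with
  | zero =>
    intro p h1 hpn hprev hf
    have hp : p = (cs.length : Int) := by push_cast at hf; omega
    rw [hp]
    simp only [skipStringA, stringEndB]
    rw [if_neg (lt_irrefl _)]
  | succ f ih =>
    intro p h1 hpn hprev hf
    simp only [stringEndB]
    obtain ⟨P, rfl⟩ : ∃ P : Nat, p = (P : Int) := ⟨p.toNat, (Int.toNat_of_nonneg (by omega)).symm⟩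
    have hPn : P ≤ cs.length := by exact_mod_cast hpn
    by_cases hj : PySem.Chars.findFrom cs [q] (P : Int) none = -1
    · rw [if_pos hj]
      have hnoinf := (PySem.Chars.findFrom_natCast_eq_neg_one_iff cs [q] P hPn).mp hj
      have hnq : q ∉ cs.drop P := fun hm => hnoinf ((infix_singleton_iff _ q).mpr hm)
      exact skipStringA_noq cs q (cs.length + 1) (P : Int) (by positivity) (by simpa using hnq)
    · rw [if_neg hj]
      obtain ⟨hle, hpre, hmin⟩ := PySem.Chars.findFrom_natCast_spec cs [q] P hPn hj
      set jI := PySem.Chars.findFrom cs [q] (P : Int) none with hjdef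
      have hj0 : 0 ≤ jI := le_trans (by positivity) hle
      have hjI : (jI.toNat : Int) = jI := Int.toNat_of_nonneg hj0
      have hqJ : cs[jI.toNat]? = some q := (prefix_singleton_iff cs jI.toNat q).mp hpre
      have hJlt : jI.toNat < cs.length := by
        have hlen := hpre.length_le
        rw [List.length_drop] at hlen
        simp only [List.length_cons, List.length_nil] at hlen
        omega
      have hgJ : PySem.List.pyGet? cs jI = some q := by
        rw [← hjI, PySem.List.pyGet?_natCast, hqJ]
      obtain ⟨hKb, hKj, hKrun, hKstop⟩ :=
        runStartB_spec cs (P : Int) (by exact_mod_cast h1) hprev (cs.length + 1) jI hle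
          (by omega) (by omega)
      have hA1 : skipStringA cs q (cs.length + 1) (P : Int) =
          skipStringA cs q (cs.length + 1) (runStartB cs (cs.length + 1) jI) := by
        refine skipStringA_to_runStart cs q (runStartB cs (cs.length + 1) jI) (P : Int)
          (by omega) hKstop ?_ ((runStartB cs (cs.length + 1) jI - (P : Int)).toNat) (P : Int)
          rfl hKb (by positivity) le_rfl
        intro m hm0 hmlt hsome
        have hm0' : 0 ≤ m := by omega
        obtain ⟨M, rfl⟩ : ∃ M : Nat, m = (M : Int) := ⟨m.toNat, (Int.toNat_of_nonneg (by omega)).symm⟩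
        have hMJ : M < jI.toNat := by omega
        have hMq : [q] <+: cs.drop M := by
          rw [prefix_singleton_iff]
          rw [PySem.List.pyGet?_natCast] at hsome
          exact hsome
        exact hmin M (by exact_mod_cast hm0) hMJ hMq
      have hA2 : skipStringA cs q (cs.length + 1) (runStartB cs (cs.length + 1) jI) =
          (if (((jI.toNat : Nat) : Int) - runStartB cs (cs.length + 1) jI) % 2 = 0
           then ((jI.toNat : Nat) : Int) + 1
           else skipStringA cs q (cs.length + 1) (((jI.toNat : Nat) : Int) + 1)) := by
        refine run_scan cs q hq jI.toNat hJlt hqJ (runStartB cs (cs.length + 1) jI) ?_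
          (((jI.toNat : Int) - runStartB cs (cs.length + 1) jI).toNat)
          (runStartB cs (cs.length + 1) jI) rfl le_rfl (by omega) (by omega)
        intro m hm1 hm2
        exact hKrun m hm1 (by omega)
      rw [hA1, hA2, hjI]
      rw [pymod2]
      by_cases hpar : (jI - runStartB cs (cs.length + 1) jI) % 2 = 0
      · rw [if_pos hpar, if_pos hpar]
      · rw [if_neg hpar, if_neg hpar]
        have hih := ih (jI + 1) (by omega) (by omega)
          (by rw [show jI + 1 - 1 = jI by ring, hgJ]
              intro h
              exact hq (Option.some.injEq _ _ ▸ h))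
          (by push_cast at hf ⊢; omega)
        rw [← hih]

theorem findFrom_le_of_prefix (cs sub : List Char) (I : Nat) (hIlen : I ≤ cs.length)
    (m : Nat) (hIm : I ≤ m) (hp : sub <+: cs.drop m) :
    PySem.Chars.findFrom cs sub (I : Int) none ≠ -1 ∧
    PySem.Chars.findFrom cs sub (I : Int) none ≤ (m : Int) := by
  have hne : PySem.Chars.findFrom cs sub (I : Int) none ≠ -1 := by
    intro h
    exact ((PySem.Chars.findFrom_natCast_eq_neg_one_iff cs sub I hIlen).mp h)
      (prefix_drop_infix cs sub I m hIm hp)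
  obtain ⟨hle, _, hmin⟩ := PySem.Chars.findFrom_natCast_spec cs sub I hIlen hne
  refine ⟨hne, ?_⟩
  by_contra hgt
  push_neg at hgt
  have hlt : m < (PySem.Chars.findFrom cs sub (I : Int) none).toNat := by omega
  exact hmin m hIm hlt hp

theorem main_lemma : ∀ (cs : List Char) (f : Nat) (i : Int), 0 ≤ i → (cs.length : Int) ≤ i + f →
    loopA cs (cs.length + 1) i = loopBj cs f i := by
  intro cs f
  induction f with
  | zero =>
    intro i h0 hf
    simp only [loopBj]
    conv_lhs => rw [loopA]
    rw [if_neg (by push_cast at hf; omega)]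
  | succ f ih =>
    intro i h0 hf
    obtain ⟨I, rfl⟩ : ∃ I : Nat, i = (I : Int) := ⟨i.toNat, (Int.toNat_of_nonneg h0).symm⟩
    by_cases hin : I ≤ cs.length
    case neg =>
      have hall : ∀ sub : List Char, PySem.Chars.findFrom cs sub (I : Int) none = -1 :=
        fun sub => findFrom_gt_len cs sub _ (by push_cast; omega)
      simp only [loopBj, hall, List.filter, PySem.List.min?]
      norm_num
      conv_lhs => rw [loopA]
      rw [if_neg (by push_cast; omega)]
    case pos =>
      have hIlen : (I : Int) ≤ (cs.length : Int) := by exact_mod_cast hin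
      simp only [loopBj]
      cases hm : PySem.List.min?
          (([PySem.Chars.findFrom cs ['{'] (I : Int) none,
             PySem.Chars.findFrom cs ['"'] (I : Int) none,
             PySem.Chars.findFrom cs ['\''] (I : Int) none,
             PySem.Chars.findFrom cs ['/', '*'] (I : Int) none]).filter
            (fun j => j ≠ -1)) (fun x => x) with
      | none =>
        have hnil := (PySem.List.min?_eq_none_iff _ _).mp hm
        rw [List.filter_eq_nil_iff] at hnil
        have h1 : PySem.Chars.findFrom cs ['{'] (I : Int) none = -1 := by
          have := hnil (PySem.Chars.findFrom cs ['{'] (I : Int) none) (by simp)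
          simpa using this
        have h2 : PySem.Chars.findFrom cs ['"'] (I : Int) none = -1 := by
          have := hnil (PySem.Chars.findFrom cs ['"'] (I : Int) none) (by simp)
          simpa using this
        have h3 : PySem.Chars.findFrom cs ['\''] (I : Int) none = -1 := by
          have := hnil (PySem.Chars.findFrom cs ['\''] (I : Int) none) (by simp)
          simpa using this
        have h4 : PySem.Chars.findFrom cs ['/', '*'] (I : Int) none = -1 := by
          have := hnil (PySem.Chars.findFrom cs ['/', '*'] (I : Int) none) (by simp)
          simpa using this
        have hbor : ∀ m : Nat, I ≤ m → m < cs.length →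
            cs[m]? ≠ some '{' ∧ cs[m]? ≠ some '"' ∧ cs[m]? ≠ some '\'' ∧
            ¬ (['/', '*'] <+: cs.drop m) := by
          intro m hIm hmlen
          refine ⟨fun hc => ?_, fun hc => ?_, fun hc => ?_, fun hc => ?_⟩
          · exact (findFrom_le_of_prefix cs ['{'] I hin m hIm
              ((prefix_singleton_iff cs m '{').mpr hc)).1 h1
          · exact (findFrom_le_of_prefix cs ['"'] I hin m hIm
              ((prefix_singleton_iff cs m '"').mpr hc)).1 h2
          · exact (findFrom_le_of_prefix cs ['\''] I hin m hIm
              ((prefix_singleton_iff cs m '\'').mpr hc)).1 h3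
          · exact (findFrom_le_of_prefix cs ['/', '*'] I hin m hIm hc).1 h4
        rw [loopA_boring cs cs.length le_rfl (cs.length - I) I rfl hin hbor, loopA_at_len]
      | some j =>
        have hjmem := PySem.List.min?_mem hm
        have hjmin := PySem.List.min?_isMin hm
        have hjne : j ≠ -1 := by
          have := List.of_mem_filter hjmem
          simpa using this
        have hjlist := List.mem_of_mem_filter hjmem
        simp only [List.mem_cons, List.not_mem_nil, or_false] at hjlist
        have hcand : ∀ (Fi : Int), Fi ∈ [PySem.Chars.findFrom cs ['{'] (I : Int) none,
             PySem.Chars.findFrom cs ['"'] (I : Int) none,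
             PySem.Chars.findFrom cs ['\''] (I : Int) none,
             PySem.Chars.findFrom cs ['/', '*'] (I : Int) none] → Fi ≠ -1 → j ≤ Fi := by
          intro Fi hmem hne
          exact hjmin Fi (List.mem_filter.mpr ⟨hmem, by simpa using hne⟩)
        rcases hjlist with hjeq | hjeq | hjeq | hjeq
        · -- j is the find of '{'
          obtain ⟨hle, hpre, hmin⟩ :=
            PySem.Chars.findFrom_natCast_spec cs ['{'] I hin (by rw [← hjeq]; exact hjne)
          rw [← hjeq] at hle hpre hmin
          have hj0 : 0 ≤ j := le_trans (by positivity) hle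
          have hjI : (j.toNat : Int) = j := Int.toNat_of_nonneg hj0
          have hqJ : cs[j.toNat]? = some '{' := prefix_head_char cs [] '{' j.toNat hpre
          have hJlt : j.toNat < cs.length := by
            have hlen := hpre.length_le
            rw [List.length_drop] at hlen
            simp only [List.length_cons, List.length_nil] at hlen
            omega
          have hbor : ∀ m : Nat, I ≤ m → m < j.toNat →
              cs[m]? ≠ some '{' ∧ cs[m]? ≠ some '"' ∧ cs[m]? ≠ some '\'' ∧
              ¬ (['/', '*'] <+: cs.drop m) := by
            intro m hIm hmJ
            have hmj : (m : Int) < j := by omega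
            refine ⟨fun hc => ?_, fun hc => ?_, fun hc => ?_, fun hc => ?_⟩
            · obtain ⟨hne1, hle1⟩ := findFrom_le_of_prefix cs ['{'] I hin m hIm
                ((prefix_singleton_iff cs m '{').mpr hc)
              have := hcand _ (by simp) hne1
              omega
            · obtain ⟨hne1, hle1⟩ := findFrom_le_of_prefix cs ['"'] I hin m hIm
                ((prefix_singleton_iff cs m '"').mpr hc)
              have := hcand _ (by simp) hne1
              omega
            · obtain ⟨hne1, hle1⟩ := findFrom_le_of_prefix cs ['\''] I hin m hIm
                ((prefix_singleton_iff cs m '\'').mpr hc)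
              have := hcand _ (by simp) hne1
              omega
            · obtain ⟨hne1, hle1⟩ := findFrom_le_of_prefix cs ['/', '*'] I hin m hIm hc
              have := hcand _ (by simp) hne1
              omega
          rw [loopA_boring cs j.toNat (le_of_lt hJlt) (j.toNat - I) I rfl (by omega) hbor]
          conv_rhs => rw [← hjI]
          conv_lhs => rw [loopA]
          rw [if_pos (by exact_mod_cast hJlt)]
          rw [if_neg (fun hsl => by
            have hp := (slice2_eq_iff_prefix cs _ j.toNat rfl).mp hsl
            have h := prefix_head_char cs ['*'] '/' j.toNat hp
            rw [hqJ] at h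
            simp at h)]
          simp only [show PySem.List.pyGet? cs ((j.toNat : Nat) : Int) = some '{' by
            rw [PySem.List.pyGet?_natCast, hqJ]]
          rw [if_neg (show ¬('{' = '"' ∨ '{' = '\'') by decide)]
          simp
        · -- j is the find of '"'
          obtain ⟨hle, hpre, hmin⟩ :=
            PySem.Chars.findFrom_natCast_spec cs ['"'] I hin (by rw [← hjeq]; exact hjne)
          rw [← hjeq] at hle hpre hmin
          have hj0 : 0 ≤ j := le_trans (by positivity) hle
          have hjI : (j.toNat : Int) = j := Int.toNat_of_nonneg hj0
          have hqJ : cs[j.toNat]? = some '"' := prefix_head_char cs [] '"' j.toNat hpre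
          have hJlt : j.toNat < cs.length := by
            have hlen := hpre.length_le
            rw [List.length_drop] at hlen
            simp only [List.length_cons, List.length_nil] at hlen
            omega
          have hbor : ∀ m : Nat, I ≤ m → m < j.toNat →
              cs[m]? ≠ some '{' ∧ cs[m]? ≠ some '"' ∧ cs[m]? ≠ some '\'' ∧
              ¬ (['/', '*'] <+: cs.drop m) := by
            intro m hIm hmJ
            have hmj : (m : Int) < j := by omega
            refine ⟨fun hc => ?_, fun hc => ?_, fun hc => ?_, fun hc => ?_⟩
            · obtain ⟨hne1, hle1⟩ := findFrom_le_of_prefix cs ['{'] I hin m hIm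
                ((prefix_singleton_iff cs m '{').mpr hc)
              have := hcand _ (by simp) hne1
              omega
            · obtain ⟨hne1, hle1⟩ := findFrom_le_of_prefix cs ['"'] I hin m hIm
                ((prefix_singleton_iff cs m '"').mpr hc)
              have := hcand _ (by simp) hne1
              omega
            · obtain ⟨hne1, hle1⟩ := findFrom_le_of_prefix cs ['\''] I hin m hIm
                ((prefix_singleton_iff cs m '\'').mpr hc)
              have := hcand _ (by simp) hne1
              omega
            · obtain ⟨hne1, hle1⟩ := findFrom_le_of_prefix cs ['/', '*'] I hin m hIm hc
              have := hcand _ (by simp) hne1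
              omega
          rw [loopA_boring cs j.toNat (le_of_lt hJlt) (j.toNat - I) I rfl (by omega) hbor]
          conv_rhs => rw [← hjI]
          have hpg : PySem.List.pyGet? cs ((j.toNat : Nat) : Int) = some '"' := by
            rw [PySem.List.pyGet?_natCast, hqJ]
          conv_lhs => rw [loopA]
          rw [if_pos (by exact_mod_cast hJlt)]
          rw [if_neg (fun hsl => by
            have hp := (slice2_eq_iff_prefix cs _ j.toNat rfl).mp hsl
            have h := prefix_head_char cs ['*'] '/' j.toNat hp
            rw [hqJ] at h
            simp at h)]
          simp only [hpg]
          rw [if_pos (by norm_num)]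
          have hentry : skipStringEntryA cs ((j.toNat : Nat) : Int) =
              skipStringA cs '"' (cs.length + 1) (((j.toNat : Nat) : Int) + 1) := by
            unfold skipStringEntryA
            simp only [hpg]
          have hSE : skipStringA cs '"' (cs.length + 1) (((j.toNat : Nat) : Int) + 1) =
              stringEndB cs '"' (cs.length + 1) (((j.toNat : Nat) : Int) + 1) := by
            refine skipStringA_eq_stringEndB cs '"' (by decide) (cs.length + 1) _
              (by omega) (by push_cast; omega) ?_ (by push_cast; omega)
            rw [show ((j.toNat : Nat) : Int) + 1 - 1 = ((j.toNat : Nat) : Int) by ring, hpg]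
            simp
          rw [hentry, hSE]
          have hE0 : 0 ≤ stringEndB cs '"' (cs.length + 1) (((j.toNat : Nat) : Int) + 1) := by
            rcases stringEndB_lb cs '"' (cs.length + 1) (((j.toNat : Nat) : Int) + 1)
              (by positivity) with h | h <;> omega
          rw [loopA_fuel_succ cs cs.length _ hE0 (by push_cast; omega)]
          refine ih _ hE0 ?_
          rcases stringEndB_lb cs '"' (cs.length + 1) (((j.toNat : Nat) : Int) + 1)
            (by positivity) with h | h
          · have hIJ : (I : Int) ≤ ((j.toNat : Nat) : Int) := by omega
            push_cast at hf hIJ h ⊢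
            omega
          · rw [h]; push_cast; omega
        · -- j is the find of '\''
          obtain ⟨hle, hpre, hmin⟩ :=
            PySem.Chars.findFrom_natCast_spec cs ['\''] I hin (by rw [← hjeq]; exact hjne)
          rw [← hjeq] at hle hpre hmin
          have hj0 : 0 ≤ j := le_trans (by positivity) hle
          have hjI : (j.toNat : Int) = j := Int.toNat_of_nonneg hj0
          have hqJ : cs[j.toNat]? = some '\'' := prefix_head_char cs [] '\'' j.toNat hpre
          have hJlt : j.toNat < cs.length := by
            have hlen := hpre.length_le
            rw [List.length_drop] at hlen
            simp only [List.length_cons, List.length_nil] at hlen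
            omega
          have hbor : ∀ m : Nat, I ≤ m → m < j.toNat →
              cs[m]? ≠ some '{' ∧ cs[m]? ≠ some '"' ∧ cs[m]? ≠ some '\'' ∧
              ¬ (['/', '*'] <+: cs.drop m) := by
            intro m hIm hmJ
            have hmj : (m : Int) < j := by omega
            refine ⟨fun hc => ?_, fun hc => ?_, fun hc => ?_, fun hc => ?_⟩
            · obtain ⟨hne1, hle1⟩ := findFrom_le_of_prefix cs ['{'] I hin m hIm
                ((prefix_singleton_iff cs m '{').mpr hc)
              have := hcand _ (by simp) hne1
              omega
            · obtain ⟨hne1, hle1⟩ := findFrom_le_of_prefix cs ['"'] I hin m hIm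
                ((prefix_singleton_iff cs m '"').mpr hc)
              have := hcand _ (by simp) hne1
              omega
            · obtain ⟨hne1, hle1⟩ := findFrom_le_of_prefix cs ['\''] I hin m hIm
                ((prefix_singleton_iff cs m '\'').mpr hc)
              have := hcand _ (by simp) hne1
              omega
            · obtain ⟨hne1, hle1⟩ := findFrom_le_of_prefix cs ['/', '*'] I hin m hIm hc
              have := hcand _ (by simp) hne1
              omega
          rw [loopA_boring cs j.toNat (le_of_lt hJlt) (j.toNat - I) I rfl (by omega) hbor]
          conv_rhs => rw [← hjI]
          have hpg : PySem.List.pyGet? cs ((j.toNat : Nat) : Int) = some '\'' := by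
            rw [PySem.List.pyGet?_natCast, hqJ]
          conv_lhs => rw [loopA]
          rw [if_pos (by exact_mod_cast hJlt)]
          rw [if_neg (fun hsl => by
            have hp := (slice2_eq_iff_prefix cs _ j.toNat rfl).mp hsl
            have h := prefix_head_char cs ['*'] '/' j.toNat hp
            rw [hqJ] at h
            simp at h)]
          simp only [hpg]
          rw [if_pos (by norm_num)]
          have hentry : skipStringEntryA cs ((j.toNat : Nat) : Int) =
              skipStringA cs '\'' (cs.length + 1) (((j.toNat : Nat) : Int) + 1) := by
            unfold skipStringEntryA
            simp only [hpg]
          have hSE : skipStringA cs '\'' (cs.length + 1) (((j.toNat : Nat) : Int) + 1) =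
              stringEndB cs '\'' (cs.length + 1) (((j.toNat : Nat) : Int) + 1) := by
            refine skipStringA_eq_stringEndB cs '\'' (by decide) (cs.length + 1) _
              (by omega) (by push_cast; omega) ?_ (by push_cast; omega)
            rw [show ((j.toNat : Nat) : Int) + 1 - 1 = ((j.toNat : Nat) : Int) by ring, hpg]
            simp
          rw [hentry, hSE]
          have hE0 : 0 ≤ stringEndB cs '\'' (cs.length + 1) (((j.toNat : Nat) : Int) + 1) := by
            rcases stringEndB_lb cs '\'' (cs.length + 1) (((j.toNat : Nat) : Int) + 1)
              (by positivity) with h | h <;> omega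
          rw [loopA_fuel_succ cs cs.length _ hE0 (by push_cast; omega)]
          refine ih _ hE0 ?_
          rcases stringEndB_lb cs '\'' (cs.length + 1) (((j.toNat : Nat) : Int) + 1)
            (by positivity) with h | h
          · have hIJ : (I : Int) ≤ ((j.toNat : Nat) : Int) := by omega
            push_cast at hf hIJ h ⊢
            omega
          · rw [h]; push_cast; omega
        · -- j is the find of '/*'
          obtain ⟨hle, hpre, hmin⟩ :=
            PySem.Chars.findFrom_natCast_spec cs ['/', '*'] I hin (by rw [← hjeq]; exact hjne)
          rw [← hjeq] at hle hpre hmin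
          have hj0 : 0 ≤ j := le_trans (by positivity) hle
          have hjI : (j.toNat : Int) = j := Int.toNat_of_nonneg hj0
          have hqJ : cs[j.toNat]? = some '/' := prefix_head_char cs ['*'] '/' j.toNat hpre
          have hJlt : j.toNat < cs.length := by
            have hlen := hpre.length_le
            rw [List.length_drop] at hlen
            simp only [List.length_cons, List.length_nil] at hlen
            omega
          have hbor : ∀ m : Nat, I ≤ m → m < j.toNat →
              cs[m]? ≠ some '{' ∧ cs[m]? ≠ some '"' ∧ cs[m]? ≠ some '\'' ∧
              ¬ (['/', '*'] <+: cs.drop m) := by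
            intro m hIm hmJ
            have hmj : (m : Int) < j := by omega
            refine ⟨fun hc => ?_, fun hc => ?_, fun hc => ?_, fun hc => ?_⟩
            · obtain ⟨hne1, hle1⟩ := findFrom_le_of_prefix cs ['{'] I hin m hIm
                ((prefix_singleton_iff cs m '{').mpr hc)
              have := hcand _ (by simp) hne1
              omega
            · obtain ⟨hne1, hle1⟩ := findFrom_le_of_prefix cs ['"'] I hin m hIm
                ((prefix_singleton_iff cs m '"').mpr hc)
              have := hcand _ (by simp) hne1
              omega
            · obtain ⟨hne1, hle1⟩ := findFrom_le_of_prefix cs ['\''] I hin m hIm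
                ((prefix_singleton_iff cs m '\'').mpr hc)
              have := hcand _ (by simp) hne1
              omega
            · obtain ⟨hne1, hle1⟩ := findFrom_le_of_prefix cs ['/', '*'] I hin m hIm hc
              have := hcand _ (by simp) hne1
              omega
          rw [loopA_boring cs j.toNat (le_of_lt hJlt) (j.toNat - I) I rfl (by omega) hbor]
          conv_rhs => rw [← hjI]
          have hpg : PySem.List.pyGet? cs ((j.toNat : Nat) : Int) = some '/' := by
            rw [PySem.List.pyGet?_natCast, hqJ]
          have hsl : PySem.List.slice cs (some ((j.toNat : Nat) : Int))
              (some (((j.toNat : Nat) : Int) + 2)) = ['/', '*'] :=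
            (slice2_eq_iff_prefix cs _ j.toNat rfl).mpr hpre
          conv_lhs => rw [loopA]
          rw [if_pos (by exact_mod_cast hJlt), if_pos hsl]
          simp only [hpg]
          rw [if_neg (show ¬'/' = '{' by decide), if_pos (show True from trivial)]
          unfold skipCommentA
          rw [if_neg (not_not_intro hsl)]
          by_cases he : PySem.Chars.findFrom cs ['*', '/'] (((j.toNat : Nat) : Int) + 2) none = -1
          · simp only [he]
            norm_num
            exact loopA_at_len cs cs.length
          · simp only [ne_eq, he, not_false_eq_true, if_true, if_neg he]
            have hJ2 : j.toNat + 2 ≤ cs.length := by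
              by_contra hgt
              exact he (findFrom_gt_len cs ['*', '/'] _ (by push_cast; omega))
            have hc2 : (((j.toNat : Nat) : Int) + 2) = ((j.toNat + 2 : Nat) : Int) := by
              push_cast; ring
            rw [hc2] at he
            obtain ⟨hle2, hpre2, hmin2⟩ := PySem.Chars.findFrom_natCast_spec cs ['*', '/']
              (j.toNat + 2) hJ2 he
            rw [hc2]
            have he0 : 0 ≤ PySem.Chars.findFrom cs ['*', '/'] ((j.toNat + 2 : Nat) : Int) none :=
              le_trans (by positivity) hle2
            rw [loopA_fuel_succ cs cs.length _ (by omega) (by push_cast at hle2 ⊢; omega)]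
            refine ih _ (by omega) ?_
            have hIJ : (I : Int) ≤ ((j.toNat : Nat) : Int) := by omega
            push_cast at hf hle2 hIJ ⊢
            omega

-- ===== VERDICT (by name: the statement is the Claim_ definition above) =====
theorem find_selector_end_py_spec : Claim_equal_find_selector_end_py := by
  intro s start _ hpre
  have h0 : (0:Int) ≤ start := hpre
  unfold Spec_find_selector_end_py find_selector_end_py find_selector_end_py_alt
  exact main_lemma s.toList (s.toList.length + 1) start hpre (by push_cast; omega)
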